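-- pv_equiv track=rewrite | github.com/xn4224nx/Advent-of-Code-Py | 2018/Day_02/main.py | box_check
-- ===== SOURCE A (Python) =====
-- def box_check(box: str) -> (bool, bool):
--     """
--     Does the box contain exactly 2 number of the same letter and does it
--     contain exactly 3 for the same letter.
--     """
--     letter_cnts = {}
--
--     # Count the occurance of each character
--     for char in box:
--         if char in letter_cnts:
--             letter_cnts[char] += 1
--         else:
--             letter_cnts[char] = 1
--
--     # Determine if there are any letters that occur twice or three times
--     counts = [x for x in letter_cnts.values()]
--     return 2 in counts, 3 in counts
-- ===== SOURCE B (Python) =====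
-- def box_check(box: str) -> (bool, bool):
--     """Sort the characters, then scan consecutive runs of equal characters
--     and collect the run lengths; answer is whether 2 / 3 is a run length."""
--     s = sorted(box)
--     lengths = []
--     while s:
--         c = s[0]
--         run = 1
--         while run < len(s) and s[run] == c:
--             run += 1
--         lengths.append(run)
--         s = s[run:]
--     return 2 in lengths, 3 in lengths
-- ===== Notes on version B (the rewrite author's own statement) =====
-- stated objective: alternative
-- what changed: Replaces the per-character dictionary counting with sorting the string and scanning consecutive runs of equal characters, collecting run lengths.
import Mathlib
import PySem

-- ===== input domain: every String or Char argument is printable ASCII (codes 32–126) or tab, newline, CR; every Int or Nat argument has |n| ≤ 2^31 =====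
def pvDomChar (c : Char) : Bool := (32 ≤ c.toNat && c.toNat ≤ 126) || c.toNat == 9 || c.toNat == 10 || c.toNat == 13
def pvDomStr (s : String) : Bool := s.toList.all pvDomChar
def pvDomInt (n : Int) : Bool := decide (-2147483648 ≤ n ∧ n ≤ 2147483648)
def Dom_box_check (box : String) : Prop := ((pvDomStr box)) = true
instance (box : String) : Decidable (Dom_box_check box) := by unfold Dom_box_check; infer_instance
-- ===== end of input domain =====

-- B replaces A's per-character dictionary counting by sort-then-scan over runs of equal
-- characters (alternative decomposition, not claimed faster).

-- ===== PORT A =====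
def box_check (box : String) : Bool × Bool :=
  let letter_cnts : PySem.Dict Char Int :=
    box.toList.foldl (fun d char =>
      if d.contains char then d.insert char (d.getD char 0 + 1)
      else d.insert char 1) PySem.Dict.empty
  let counts : List Int := letter_cnts.values
  (counts.contains 2, counts.contains 3)

-- ===== PORT B =====
-- the outer `while s:` loop of Source B: each step measures the leading run (the inner
-- `while` counts `run` leading characters equal to s[0]) and continues on s[run:]
def runLengths : List Char → List Int
  | [] => []
  | c :: rest =>
    (((rest.takeWhile (· == c)).length : Int) + 1) :: runLengths (rest.dropWhile (· == c))
  termination_by l => l.length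
  decreasing_by
    simp only [List.length_cons]
    exact Nat.lt_succ_of_le (List.length_dropWhile_le _ _)

def box_check_alt (box : String) : Bool × Bool :=
  let s := PySem.List.sorted box.toList (fun c => c) false
  let lengths := runLengths s
  (lengths.contains 2, lengths.contains 3)

-- ===== PRECONDITION & SPEC =====
def Spec_box_check (box : String) (out : Bool × Bool) : Prop := out = box_check_alt box
instance (box : String) (out : Bool × Bool) : Decidable (Spec_box_check box out) := by unfold Spec_box_check; infer_instance

-- ===== CLAIM (what is proved, stated in full; the proofs are below) =====
def Claim_equal_box_check : Prop := ∀ (box : String), Dom_box_check box → Spec_box_check box (box_check box)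

-- ===== LEMMAS AND PROOFS =====

-- A's counting loop is collections.Counter: the two branch bodies coincide
theorem foldl_eq_counter (l : List Char) :
    l.foldl (fun d char =>
      if d.contains char then d.insert char (d.getD char 0 + 1)
      else d.insert char (1 : Int)) PySem.Dict.empty = PySem.Dict.counter l := by
  rw [← PySem.Dict.foldl_insert_getD_add_one_eq_counter]
  congr 1
  funext d ch
  by_cases h : d.contains ch
  · simp [h]
  · have hc : d.contains ch = false := by simpa using h
    have h0 : d.getD ch 0 = 0 := PySem.Dict.getD_of_not_contains d 0 hc
    simp [h, h0]

theorem mem_values_counter (l : List Char) (v : Int) :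
    v ∈ (PySem.Dict.counter l).values ↔ ∃ c ∈ l, (l.count c : Int) = v := by
  show v ∈ ((PySem.Dict.counter l).items).map Prod.snd ↔ _
  rw [PySem.Dict.items_counter, List.map_map]
  simp [PySem.Set.mem_ofList]

-- run lengths of a list whose equal elements are contiguous are exactly the
-- multiplicities of its elements
theorem mem_runLengths : ∀ (n : Nat) (s : List Char), s.length ≤ n → s.Pairwise (· ≤ ·) →
    ∀ v : Int, (v ∈ runLengths s ↔ ∃ c ∈ s, (s.count c : Int) = v)
  | _, [], _, _, v => by simp [runLengths]
  | Nat.succ n, c :: rest, hlen, hp, v => by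
    have hcle : ∀ x ∈ rest, c ≤ x := (List.pairwise_cons.mp hp).1
    have hrp : rest.Pairwise (· ≤ ·) := (List.pairwise_cons.mp hp).2
    set t := rest.takeWhile (· == c) with ht
    set d := rest.dropWhile (· == c) with hd
    have hsplit : rest = t ++ d := (List.takeWhile_append_dropWhile).symm
    have ht_all : ∀ x ∈ t, x = c := by
      intro x hx
      have := List.mem_takeWhile_imp hx
      simpa [beq_iff_eq] using this
    have hdsub : d.Sublist rest := List.dropWhile_sublist _
    have hdp : d.Pairwise (· ≤ ·) := List.Pairwise.sublist hdsub hrp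
    have hd_ne : ∀ x ∈ d, x ≠ c := by
      cases hdc : d with
      | nil => intro x hx; simp at hx
      | cons d0 dt =>
        have hd0 : ¬ (d0 == c) = true := by
          have := List.head_dropWhile_not (p := (· == c)) (l := rest) (by rw [← hd, hdc]; simp)
          simp only [← hd, hdc, List.head_cons] at this; simp [this]
        have hd0ne : d0 ≠ c := by simpa [beq_iff_eq] using hd0
        have hcd0 : c ≤ d0 := hcle d0 (hdsub.mem (by rw [hdc]; exact List.mem_cons_self))
        have hclt : c < d0 := lt_of_le_of_ne hcd0 (Ne.symm hd0ne)
        intro x hx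
        rcases List.mem_cons.mp hx with rfl | hx
        · exact hd0ne
        · have : d0 ≤ x := by
            rw [hdc] at hdp
            exact (List.pairwise_cons.mp hdp).1 x hx
          exact fun hxc => absurd (hxc ▸ this) (not_le.mpr hclt)
    have hcount_c : (c :: rest).count c = t.length + 1 := by
      have h1 : t.count c = t.length := List.count_eq_length.mpr (fun b hb => ((ht_all b hb).symm ▸ rfl))
      have h2 : d.count c = 0 := List.count_eq_zero.mpr (fun hc => hd_ne c hc rfl)
      rw [List.count_cons_self, hsplit, List.count_append, h1, h2]
    have hcount_d : ∀ x ∈ d, (c :: rest).count x = d.count x := by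
      intro x hx
      have hxc : x ≠ c := hd_ne x hx
      have h1 : t.count x = 0 := by
        rw [List.count_eq_zero]; intro hc; exact hxc (ht_all x hc)
      have hcx : ¬ (x == c) = true := by simpa [beq_iff_eq] using hxc
      rw [hsplit]
      have hcx2 : ¬ (c = x) := fun hh => hxc hh.symm
      simp [List.count_append, h1, hcx2]
    have hdlen : d.length ≤ n := by
      have h1 := hdsub.length_le
      have h2 : rest.length + 1 ≤ n + 1 := by simpa using hlen
      omega
    have ih := mem_runLengths n d hdlen hdp v
    constructor
    · intro hv
      rw [runLengths] at hv
      rcases List.mem_cons.mp hv with rfl | hv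
      · exact ⟨c, List.mem_cons_self, by rw [hcount_c]; push_cast; ring⟩
      · rcases ih.mp hv with ⟨x, hx, hcnt⟩
        exact ⟨x, List.mem_cons.mpr (Or.inr (hsplit ▸ List.mem_append.mpr (Or.inr hx))),
          by rw [hcount_d x hx]; exact hcnt⟩
    · rintro ⟨x, hx, hcnt⟩
      rw [runLengths]
      have hx' : x = c ∨ x ∈ d := by
        rcases List.mem_cons.mp hx with rfl | hx
        · exact Or.inl rfl
        · rw [hsplit] at hx
          rcases List.mem_append.mp hx with hx | hx
          · exact Or.inl (ht_all x hx)
          · exact Or.inr hx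
      rcases hx' with rfl | hx'
      · refine List.mem_cons.mpr (Or.inl ?_)
        rw [← hcnt, hcount_c]; push_cast; ring
      · exact List.mem_cons.mpr (Or.inr (ih.mpr ⟨x, hx', by rw [← hcount_d x hx']; exact hcnt⟩))

theorem box_check_eq_alt (box : String) : box_check box = box_check_alt box := by
  set l := box.toList with hl
  set s := PySem.List.sorted l (fun c => c) false with hs
  have hperm : s.Perm l := PySem.List.sorted_perm l (fun c => c) false
  have hpw : s.Pairwise (· ≤ ·) := by
    have := PySem.List.sorted_pairwise l (fun c => c)
    simpa [hs] using this
  have key : ∀ v : Int, v ∈ runLengths s ↔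
      v ∈ ((l.foldl (fun d char =>
        if d.contains char then d.insert char (d.getD char 0 + 1)
        else d.insert char (1 : Int)) PySem.Dict.empty).values) := by
    intro v
    rw [foldl_eq_counter, mem_values_counter,
      mem_runLengths s.length s (le_refl _) hpw v]
    constructor
    · rintro ⟨c, hc, hcnt⟩
      exact ⟨c, hperm.mem_iff.mp hc, by rw [← hperm.count_eq]; exact hcnt⟩
    · rintro ⟨c, hc, hcnt⟩
      exact ⟨c, hperm.mem_iff.mpr hc, by rw [hperm.count_eq]; exact hcnt⟩
  simp only [box_check, box_check_alt, ← hl, ← hs, Prod.mk.injEq]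
  constructor <;>
  · rw [Bool.eq_iff_iff]
    simp only [List.contains_iff_mem]
    exact (key _).symm

-- ===== VERDICT (by name: the statement is the Claim_ definition above) =====
theorem box_check_spec : Claim_equal_box_check := by
  intro box _
  exact box_check_eq_alt box
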